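-- pv_equiv track=rewrite | github.com/hanmarookim/programmers | Level3 - 여행경로/programmers_여행경로.py | solution
-- ===== SOURCE A (Python) =====
-- def solution(tickets):
--     answer = []
--     stack = []
--     visit = []
--     stack.append(['ICN', tickets, ['ICN']])
--     while stack:
--         node = stack.pop()
--         if len(node[1]) == 0:
--             visit.append(node[2])
--         for t in range(len(node[1])):
--             if node[1][t][0] == node[0]:
--                 ti = node[1][:t] + node[1][t+1:]
--                 stack.append([node[1][t][1], ti, node[2]+[node[1][t][1]]])
--     visit = sorted(visit)
--     return visit
-- ===== SOURCE B (Python) =====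
-- def solution(tickets):
--     def dfs(airport, remaining, path):
--         if not remaining:
--             return [path]
--         out = []
--         for i in range(len(remaining)):
--             if remaining[i][0] == airport:
--                 out += dfs(remaining[i][1], remaining[:i] + remaining[i + 1:], path + [remaining[i][1]])
--         return out
--     return sorted(dfs('ICN', tickets, ['ICN']))
-- ===== Notes on version B (the rewrite author's own statement) =====
-- stated objective: simpler
-- what changed: Replaces A's explicit stack of [airport, remaining, path] nodes popped in a while loop by a recursive backtracking helper dfs that returns the list of completed itineraries directly; same sorted result since sorting cancels the LIFO-vs-left-to-right exploration order.
-- outside the precondition, e.g. on solution([['AAA', 'BBB'], ['BBB']]): A returns [], B returns []; on solution([['AAA', 'BBB'], ['ICN']]): A raises IndexError, B raises IndexError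
import Mathlib
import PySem

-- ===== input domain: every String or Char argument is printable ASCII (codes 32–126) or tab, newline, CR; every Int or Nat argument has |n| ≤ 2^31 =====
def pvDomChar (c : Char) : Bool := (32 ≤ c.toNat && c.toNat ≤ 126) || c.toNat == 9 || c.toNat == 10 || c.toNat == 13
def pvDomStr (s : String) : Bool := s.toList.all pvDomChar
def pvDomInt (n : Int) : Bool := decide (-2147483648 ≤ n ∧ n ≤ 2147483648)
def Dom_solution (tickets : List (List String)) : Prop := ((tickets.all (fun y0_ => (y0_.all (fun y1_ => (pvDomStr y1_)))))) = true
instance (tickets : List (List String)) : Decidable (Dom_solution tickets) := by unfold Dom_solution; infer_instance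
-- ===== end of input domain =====

-- B replaces A's explicit stack loop by recursive backtracking (same multiset of itineraries,
-- same sorted result); objective: simpler decomposition, not speed.

-- ===== PORT A =====
-- A's state: [airport, remaining tickets, path] triples on an explicit stack (top = head here,
-- since Python pushes/pops at the end).  node[1][:t] + node[1][t+1:] is take t ++ drop (t+1),
-- exact for 0 ≤ t < len.  Indexing uses getD; Pre_solution guarantees the indexed fields exist.
def childrenA (node : String × List (List String) × List String) :
    List (String × List (List String) × List String) :=
  (List.range node.2.1.length).filterMap (fun t =>
    let tk := node.2.1.getD t []
    if tk.getD 0 "" == node.1 then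
      some (tk.getD 1 "", node.2.1.take t ++ node.2.1.drop (t + 1),
            node.2.2 ++ [tk.getD 1 ""])
    else none)

def measureA (stack : List (String × List (List String) × List String)) : Nat :=
  (stack.map (fun n => (n.2.1.length + 1).factorial)).sum

theorem childrenA_len {node c} (hc : c ∈ childrenA node) :
    c.2.1.length + 1 = node.2.1.length := by
  rcases List.mem_filterMap.mp hc with ⟨t, ht, he⟩
  simp only at he
  split at he
  · cases he
    have ht' := List.mem_range.mp ht
    simp [List.length_take, List.length_drop]
    omega
  · cases he

theorem measureA_children (node : String × List (List String) × List String) :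
    measureA (childrenA node) < (node.2.1.length + 1).factorial := by
  have hlen : (childrenA node).length ≤ node.2.1.length := by
    calc (childrenA node).length ≤ (List.range node.2.1.length).length :=
          List.length_filterMap_le _ _
      _ = node.2.1.length := List.length_range
  have hbound : ∀ x ∈ (childrenA node).map (fun n => (n.2.1.length + 1).factorial),
      x ≤ (node.2.1.length).factorial := by
    intro x hx
    rcases List.mem_map.mp hx with ⟨c, hc, rfl⟩
    rw [childrenA_len hc]
  calc measureA (childrenA node)
      ≤ ((childrenA node).map (fun n => (n.2.1.length + 1).factorial)).length
          • (node.2.1.length).factorial := List.sum_le_card_nsmul _ _ hbound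
    _ = (childrenA node).length * (node.2.1.length).factorial := by
          simp [smul_eq_mul]
    _ ≤ node.2.1.length * (node.2.1.length).factorial :=
          Nat.mul_le_mul_right _ hlen
    _ < (node.2.1.length + 1) * (node.2.1.length).factorial := by
          have := Nat.factorial_pos node.2.1.length
          exact (Nat.mul_lt_mul_right this).mpr (Nat.lt_succ_self _)
    _ = (node.2.1.length + 1).factorial := (Nat.factorial_succ _).symm

def loopA (stack : List (String × List (List String) × List String))
    (visit : List (List String)) : List (List String) :=
  match stack with
  | [] => visit
  | node :: rest =>
      loopA ((childrenA node).reverse ++ rest)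
        (if node.2.1 = [] then visit ++ [node.2.2] else visit)
termination_by measureA stack
decreasing_by
  have h := measureA_children node
  simp [measureA, List.map_append, List.sum_append, List.map_reverse, List.sum_reverse] at *
  omega

def solution (tickets : List (List String)) : List (List String) :=
  PySem.List.sorted (loopA [("ICN", tickets, ["ICN"])] []) (fun x => x) false

-- ===== PORT B =====
def dfsB (airport : String) (remaining : List (List String)) (path : List String) :
    List (List String) :=
  if remaining = [] then [path]
  else
    ((List.range remaining.length).attach.map (fun i =>
      let tk := remaining.getD i.1 []
      if tk.getD 0 "" == airport then
        dfsB (tk.getD 1 "") (remaining.take i.1 ++ remaining.drop (i.1 + 1))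
          (path ++ [tk.getD 1 ""])
      else [])).flatten
termination_by remaining.length
decreasing_by
  have := List.mem_range.mp i.2
  simp [List.length_take, List.length_drop]
  omega

def solution_alt (tickets : List (List String)) : List (List String) :=
  PySem.List.sorted (dfsB "ICN" tickets ["ICN"]) (fun x => x) false

-- ===== PRECONDITION & SPEC =====
-- Pre_ excludes tickets with fewer than two fields whose first field could be a reached airport
-- (conservatively: "ICN" or some ticket's destination): there A raises IndexError when the
-- ticket is reached, and the exclusion is conservative where such a ticket is never reached.
def Pre_solution (tickets : List (List String)) : Prop :=
  ∀ t ∈ tickets, 2 ≤ t.length ∨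
    (t.length = 1 ∧ t.getD 0 "" ≠ "ICN" ∧
      t.getD 0 "" ∉ tickets.map (fun s => s.getD 1 ""))
instance (tickets : List (List String)) : Decidable (Pre_solution tickets) := by
  unfold Pre_solution; infer_instance

def pvWitness_solution : List (List String) := [["ICN", "AAA"], ["AAA", "ICN"]]

def Spec_solution (tickets : List (List String)) (out : List (List String)) : Prop := out = solution_alt tickets
instance (tickets : List (List String)) (out : List (List String)) : Decidable (Spec_solution tickets out) := by unfold Spec_solution; infer_instance

-- ===== CLAIM (what is proved, stated in full; the proofs are below) =====
def Claim_equal_solution : Prop := ∀ (tickets : List (List String)), Dom_solution tickets → Pre_solution tickets → Spec_solution tickets (solution tickets)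

-- ===== LEMMAS AND PROOFS =====

theorem flatten_filterMap_map {α β γ : Type} (l : List α) (c : α → Bool) (g : α → β)
    (f : β → List γ) :
    ((l.filterMap (fun x => if c x then some (g x) else none)).map f).flatten
      = (l.map (fun x => if c x then f (g x) else [])).flatten := by
  induction l with
  | nil => rfl
  | cons a l ih => by_cases h : c a <;> simp [h, ih]

-- dfsB unfolded into A's child-building shape: the emitted path plus the recursion on childrenA.
theorem dfsB_unfold (a : String) (rem : List (List String)) (p : List String) :
    dfsB a rem p = (if rem = [] then [p] else [])
      ++ ((childrenA (a, rem, p)).map (fun n => dfsB n.1 n.2.1 n.2.2)).flatten := by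
  by_cases h : rem = []
  · subst h; rw [dfsB]; simp [childrenA]
  · rw [dfsB]
    simp only [if_neg h, List.nil_append]
    rw [@List.attach_map_val _ _ (List.range rem.length)
      (fun i =>
        if ((rem.getD i []).getD 0 "" == a) = true then
          dfsB ((rem.getD i []).getD 1 "") (List.take i rem ++ List.drop (i + 1) rem)
            (p ++ [(rem.getD i []).getD 1 ""])
        else [])]
    rw [childrenA, flatten_filterMap_map]

-- A's stack loop, from any stack, collects (a permutation of) what B's dfs collects per node.
theorem loopA_perm (stack : List (String × List (List String) × List String))
    (visit : List (List String)) :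
    (loopA stack visit).Perm
      (visit ++ (stack.map (fun n => dfsB n.1 n.2.1 n.2.2)).flatten) := by
  induction stack, visit using loopA.induct with
  | case1 visit => simp [loopA]
  | case2 visit node rest ih =>
    rw [loopA]
    refine ih.trans ?_
    have hconv : (if _h : node.2.1 = [] then visit ++ [node.2.2] else visit)
        = visit ++ (if node.2.1 = [] then [node.2.2] else []) := by
      split <;> simp
    simp only [List.map_cons, List.map_append, List.map_reverse, List.flatten_cons,
      List.flatten_append]
    rw [hconv, dfsB_unfold node.1 node.2.1 node.2.2]
    have hrev : ((childrenA node).map (fun n => dfsB n.1 n.2.1 n.2.2)).reverse.flatten.Perm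
        ((childrenA node).map (fun n => dfsB n.1 n.2.1 n.2.2)).flatten :=
      (List.reverse_perm _).flatten
    simp only [List.append_assoc]
    exact ((hrev.append_right _).append_left _).append_left visit

-- ===== VERDICT (by name: the statement is the Claim_ definition above) =====
theorem solution_spec : Claim_equal_solution := by
  intro tickets _ _
  unfold Spec_solution solution solution_alt
  have h := loopA_perm [("ICN", tickets, ["ICN"])] []
  simp only [List.map_cons, List.map_nil, List.flatten_cons, List.flatten_nil,
    List.append_nil, List.nil_append] at h
  have hinst : (fun (a b : List String) => a.decidableLT b)
      = @LinearOrder.toDecidableLT (List String) List.instLinearOrder := by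
    funext a b; exact Subsingleton.elim _ _
  rw [hinst]
  exact PySem.List.sorted_eq_sorted_of_perm _ _ _ (fun x y hxy => hxy) h
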